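-- pv_equiv track=rewrite | github.com/leohuang257/omniserve | serving/openai_api.py | _strip_trailing_specials
-- ===== SOURCE A (Python) =====
-- _CHAT_STOP_TOKEN_STRINGS = [
--     "<|eot_id|>",
--     "<|end_of_text|>",
--     "<|im_end|>",
--     "<|endoftext|>",
--     "</s>",
-- ]
--
-- def _strip_trailing_specials(text: str) -> str:
--     """Drop trailing chat-stop special-token strings from a decoded text.
--
--     The engine's output_text is decode(all_ids) without skip_special_tokens,
--     so if the model emitted e.g. <|eot_id|> before stopping, it will appear
--     as literal text at the tail. Remove it so clients see clean assistant text.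
--     """
--     changed = True
--     while changed:
--         changed = False
--         for s in _CHAT_STOP_TOKEN_STRINGS:
--             if text.endswith(s):
--                 text = text[: -len(s)]
--                 changed = True
--         text = text.rstrip()
--     return text
-- ===== SOURCE B (Python) =====
-- _CHAT_STOP_TOKEN_STRINGS = [
--     "<|eot_id|>",
--     "<|end_of_text|>",
--     "<|im_end|>",
--     "<|endoftext|>",
--     "</s>",
-- ]
--
-- def _strip_trailing_specials(text: str) -> str:
--     """Single backward index scan: no intermediate string is ever built.
--
--     Keeps an `end` index into the original text; whitespace is skipped by
--     moving the index, a stop token found right before the index retracts it,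
--     and the answer is one final slice.  (Also strips a stop token that a
--     whitespace skip uncovers, which the original's changed-flag loop misses.)
--     """
--     end = len(text)
--     while True:
--         while end > 0 and text[end - 1].isspace():
--             end -= 1
--         for s in _CHAT_STOP_TOKEN_STRINGS:
--             if text.endswith(s, 0, end):
--                 end -= len(s)
--                 break
--         else:
--             return text[:end]
-- ===== Notes on version B (the rewrite author's own statement) =====
-- stated objective: alternative
-- what changed: Replaces A's changed-flag fixpoint of repeated rstrip()/slice copies with a single backward index scan that only moves an end cursor (bounded endswith checks, no intermediate strings) and takes one final slice; the scan also keeps stripping tokens uncovered by whitespace, fixing A's early exit.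
-- intended difference: On texts ending in whitespace whose rstrip() ends in a stop token, A's changed flag stays false so A returns text.rstrip() with that stop token still attached, while B keeps stripping past it; dropping the trailing stop token is the function's stated purpose, so B's value is the intended one. — e.g. on _strip_trailing_specials("x</s> "): A returns "x</s>", B returns "x"
import Mathlib
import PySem

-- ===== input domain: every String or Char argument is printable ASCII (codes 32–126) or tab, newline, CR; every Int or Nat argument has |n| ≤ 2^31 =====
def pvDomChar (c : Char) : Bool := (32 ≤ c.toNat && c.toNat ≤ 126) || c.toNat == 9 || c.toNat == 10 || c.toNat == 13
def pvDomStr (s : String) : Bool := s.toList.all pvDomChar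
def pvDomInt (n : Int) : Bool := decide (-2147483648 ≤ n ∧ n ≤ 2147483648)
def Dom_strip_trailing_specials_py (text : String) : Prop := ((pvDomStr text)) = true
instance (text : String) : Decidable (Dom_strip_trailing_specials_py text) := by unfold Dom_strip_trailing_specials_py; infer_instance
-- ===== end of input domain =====

-- B replaces A's changed-flag slicing fixpoint by a single backward index scan (no intermediate
-- strings); B also strips a stop token that trailing whitespace hides, which A's flag loop misses (see D_).


-- ===== PORT A =====
def pvTokens : List (List Char) :=
  ["<|eot_id|>".toList, "<|end_of_text|>".toList, "<|im_end|>".toList,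
   "<|endoftext|>".toList, "</s>".toList]

-- body of A's 'for s in _CHAT_STOP_TOKEN_STRINGS' loop (text[:-len(s)] = take (len - len s): len s > 0)
def pvStepA (acc : List Char × Bool) (s : List Char) : List Char × Bool :=
  if PySem.Chars.endswith acc.1 s then (acc.1.take (acc.1.length - s.length), true) else acc

def pvPassA (t : List Char) : List Char × Bool := pvTokens.foldl pvStepA (t, false)

-- A's 'while changed' loop; each continuing pass shortens the text, so fuel = len+1 never runs out
def pvLoopA : Nat → List Char → List Char
  | 0, t => t
  | fuel+1, t =>
      let p := pvPassA t
      let t2 := PySem.Chars.rstrip p.1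
      if p.2 then pvLoopA fuel t2 else t2

def strip_trailing_specials_py (text : String) : String :=
  String.ofList (pvLoopA (text.toList.length + 1) text.toList)

-- ===== PORT B =====
-- B's inner 'while end > 0 and text[end-1].isspace(): end -= 1'  (text[end-1] is in range here)
def pvSkipWs (t : List Char) : Nat → Nat
  | 0 => 0
  | e+1 => if PySem.Chars.isspace (t.getD e ' ') then pvSkipWs t e else e + 1

-- B's 'for s … if text.endswith(s, 0, end)' with for/else:  endswith(s, 0, end) = (take end).endswith s
def pvFindTok (t : List Char) (e : Nat) : Option (List Char) :=
  pvTokens.find? (fun s => PySem.Chars.endswith (t.take e) s)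

-- B's 'while True' loop over the index; each round lowers 'end', so fuel = len+1 never runs out
def pvLoopB (t : List Char) : Nat → Nat → Nat
  | 0, e => e
  | fuel+1, e =>
      let e1 := pvSkipWs t e
      match pvFindTok t e1 with
      | some s => pvLoopB t fuel (e1 - s.length)
      | none => e1

def strip_trailing_specials_py_alt (text : String) : String :=
  String.ofList (List.take (pvLoopB text.toList (text.toList.length + 1) text.toList.length) text.toList)

-- ===== PRECONDITION & SPEC =====
-- On texts ending in whitespace whose rstrip ends in a stop token, A's changed-flag loop exits without
-- removing that token and returns text.rstrip(); B removes it (and keeps stripping), which is the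
-- function's stated purpose (drop trailing stop tokens), so B's value is the intended one.
def D_strip_trailing_specials_py (text : String) : Prop :=
  PySem.Chars.isspace (text.toList.getLastD 'x') = true ∧
  ∃ s ∈ pvTokens, PySem.Chars.endswith (PySem.Chars.rstrip text.toList) s = true
instance (text : String) : Decidable (D_strip_trailing_specials_py text) := by
  unfold D_strip_trailing_specials_py; infer_instance

def Spec_strip_trailing_specials_py (text : String) (out : String) : Prop :=
  ¬ D_strip_trailing_specials_py text → out = strip_trailing_specials_py_alt text
instance (text : String) (out : String) : Decidable (Spec_strip_trailing_specials_py text out) := by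
  unfold Spec_strip_trailing_specials_py; infer_instance

def pvDiffWitness_strip_trailing_specials_py : String := "x</s> "
def pvDiffWitnessOut_strip_trailing_specials_py : String × String := ("x</s>", "x")

-- ===== CLAIM (what is proved, stated in full; the proofs are below) =====
def Claim_unchanged_strip_trailing_specials_py : Prop := ∀ (text : String), Dom_strip_trailing_specials_py text → Spec_strip_trailing_specials_py text (strip_trailing_specials_py text)
def Claim_changed_strip_trailing_specials_py : Prop := Dom_strip_trailing_specials_py (pvDiffWitness_strip_trailing_specials_py) ∧ D_strip_trailing_specials_py (pvDiffWitness_strip_trailing_specials_py) ∧ strip_trailing_specials_py (pvDiffWitness_strip_trailing_specials_py) = pvDiffWitnessOut_strip_trailing_specials_py.1 ∧ strip_trailing_specials_py_alt (pvDiffWitness_strip_trailing_specials_py) = pvDiffWitnessOut_strip_trailing_specials_py.2 ∧ pvDiffWitnessOut_strip_trailing_specials_py.1 ≠ pvDiffWitnessOut_strip_trailing_specials_py.2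
def Claim_exact_strip_trailing_specials_py : Prop := ∀ (text : String), Dom_strip_trailing_specials_py text → D_strip_trailing_specials_py text → strip_trailing_specials_py text ≠ strip_trailing_specials_py_alt text

-- ===== LEMMAS AND PROOFS =====

-- the common mathematical value: repeatedly rstrip, then strip the (unique) stop token at the end
def pvF : Nat → List Char → List Char
  | 0, t => t
  | fuel+1, t =>
      let r := PySem.Chars.rstrip t
      match pvTokens.find? (fun s => PySem.Chars.endswith r s) with
      | some s => pvF fuel (r.take (r.length - s.length))
      | none => r

def pvFF (t : List Char) : List Char := pvF (t.length + 1) t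

-- facts about the five tokens, by computation
lemma pvTok_ne_nil : ∀ s ∈ pvTokens, s ≠ [] := by decide
lemma pvTok_last : ∀ s ∈ pvTokens, PySem.Chars.isspace (s.getLastD 'x') = false := by decide
lemma pvTok_suffix_eq : ∀ s₁ ∈ pvTokens, ∀ s₂ ∈ pvTokens, s₁ <:+ s₂ → s₁ = s₂ := by decide

lemma pv_endswith_iff (t s : List Char) : PySem.Chars.endswith t s = true ↔ s <:+ t := by
  simp [PySem.Chars.endswith, List.isSuffixOf_iff_suffix]

lemma pv_unique_match (t s₁ s₂ : List Char) (h₁ : s₁ ∈ pvTokens) (h₂ : s₂ ∈ pvTokens)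
    (e₁ : PySem.Chars.endswith t s₁ = true) (e₂ : PySem.Chars.endswith t s₂ = true) : s₁ = s₂ := by
  rw [pv_endswith_iff] at e₁ e₂
  rcases List.suffix_or_suffix_of_suffix e₁ e₂ with h | h
  · exact pvTok_suffix_eq _ h₁ _ h₂ h
  · exact (pvTok_suffix_eq _ h₂ _ h₁ h).symm

-- rstrip facts
lemma pv_rstrip_length_le (t : List Char) : (PySem.Chars.rstrip t).length ≤ t.length := by
  have h := List.length_dropWhile_le PySem.Chars.isspace t.reverse
  simpa [PySem.Chars.rstrip] using h

lemma pv_rstrip_concat (l : List Char) (c : Char) :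
    PySem.Chars.rstrip (l ++ [c]) =
      if PySem.Chars.isspace c then PySem.Chars.rstrip l else l ++ [c] := by
  simp [PySem.Chars.rstrip, List.dropWhile_cons]
  split_ifs <;> simp

lemma pv_rstrip_idem (t : List Char) :
    PySem.Chars.rstrip (PySem.Chars.rstrip t) = PySem.Chars.rstrip t := by
  simp [PySem.Chars.rstrip, List.dropWhile_idempotent]

lemma pv_rstrip_eq_self (t : List Char) (h : PySem.Chars.isspace (t.getLastD 'x') = false) :
    PySem.Chars.rstrip t = t := by
  induction t using List.reverseRecOn with
  | nil => rfl
  | append_singleton l c _ =>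
      rw [pv_rstrip_concat]
      rw [List.getLastD_concat] at h
      simp [h]

lemma pv_rstrip_ne_self (t : List Char) (h : PySem.Chars.rstrip t ≠ t) :
    PySem.Chars.isspace (t.getLastD 'x') = true := by
  by_contra hc
  exact h (pv_rstrip_eq_self t (by simpa using hc))

lemma pv_endswith_last (t s : List Char) (hs : s ≠ []) (h : PySem.Chars.endswith t s = true) :
    t.getLastD 'x' = s.getLastD 'x' := by
  obtain ⟨w, rfl⟩ := (pv_endswith_iff _ s).mp h
  induction s using List.reverseRecOn with
  | nil => exact absurd rfl hs
  | append_singleton u c _ => rw [← List.append_assoc, List.getLastD_concat, List.getLastD_concat]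

-- a token suffix forces a non-space last char, hence rstrip = id
lemma pv_rstrip_eq_of_match (t s : List Char) (hs : s ∈ pvTokens)
    (h : PySem.Chars.endswith t s = true) : PySem.Chars.rstrip t = t := by
  apply pv_rstrip_eq_self
  rw [pv_endswith_last t s (pvTok_ne_nil s hs) h]
  exact pvTok_last s hs

lemma pv_strip_len (t s : List Char) (hs : s ∈ pvTokens) (h : PySem.Chars.endswith t s = true) :
    (t.take (t.length - s.length)).length = t.length - s.length ∧ t.length - s.length < t.length := by
  have hsuf := (pv_endswith_iff t s).mp h
  have hle := hsuf.length_le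
  have hpos : 0 < s.length := List.length_pos_iff.mpr (pvTok_ne_nil s hs)
  refine ⟨by rw [List.length_take]; omega, by omega⟩

lemma pvF_fuel_irrel : ∀ f₁ : Nat, ∀ t : List Char, ∀ f₂ : Nat, t.length < f₁ → t.length < f₂ →
    pvF f₁ t = pvF f₂ t := by
  intro f₁
  induction f₁ with
  | zero => intro t f₂ h₁ _; omega
  | succ f ih =>
      intro t f₂ h₁ h₂
      cases f₂ with
      | zero => omega
      | succ g =>
          simp only [pvF]
          cases hf : pvTokens.find? (fun s => PySem.Chars.endswith (PySem.Chars.rstrip t) s) with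
          | none => rfl
          | some s =>
              have hs : s ∈ pvTokens := List.mem_of_find?_eq_some hf
              have hp : PySem.Chars.endswith (PySem.Chars.rstrip t) s = true := List.find?_some hf
              have hlen := pv_strip_len (PySem.Chars.rstrip t) s hs hp
              have hr := pv_rstrip_length_le t
              exact ih _ _ (by omega) (by omega)

lemma pvFF_rstrip (t : List Char) : pvFF (PySem.Chars.rstrip t) = pvFF t := by
  have hidem := pv_rstrip_idem t
  simp only [pvFF, pvF, hidem]
  cases hf : pvTokens.find? (fun s => PySem.Chars.endswith (PySem.Chars.rstrip t) s) with
  | none => rfl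
  | some s =>
      have hs : s ∈ pvTokens := List.mem_of_find?_eq_some hf
      have hp : PySem.Chars.endswith (PySem.Chars.rstrip t) s = true := List.find?_some hf
      have hlen := pv_strip_len (PySem.Chars.rstrip t) s hs hp
      have hr := pv_rstrip_length_le t
      exact pvF_fuel_irrel _ _ _ (by omega) (by omega)

lemma pvFF_strip_token (t s : List Char) (hs : s ∈ pvTokens) (h : PySem.Chars.endswith t s = true) :
    pvFF (t.take (t.length - s.length)) = pvFF t := by
  have hr := pv_rstrip_eq_of_match t s hs h
  conv_rhs => rw [pvFF, pvF]
  simp only [hr]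
  cases hf : pvTokens.find? (fun x => PySem.Chars.endswith t x) with
  | none =>
      have := List.find?_eq_none.mp hf s hs
      simp [h] at this
  | some s' =>
      have hs' : s' ∈ pvTokens := List.mem_of_find?_eq_some hf
      have hp' : PySem.Chars.endswith t s' = true := List.find?_some hf
      have : s' = s := pv_unique_match t s' s hs' hs hp' h
      subst this
      have hlen := pv_strip_len t s' hs h
      exact pvF_fuel_irrel _ _ _ (by omega) (by omega)

lemma pvFF_no_token (t : List Char)
    (h : ∀ s ∈ pvTokens, PySem.Chars.endswith (PySem.Chars.rstrip t) s = false) :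
    pvFF t = PySem.Chars.rstrip t := by
  have hf : pvTokens.find? (fun s => PySem.Chars.endswith (PySem.Chars.rstrip t) s) = none :=
    List.find?_eq_none.mpr (fun s hs => by simp [h s hs])
  simp only [pvFF, pvF, hf]

lemma pvF_no_token_suffix : ∀ fuel : Nat, ∀ t : List Char, t.length < fuel →
    ∀ s ∈ pvTokens, PySem.Chars.endswith (pvF fuel t) s = false := by
  intro fuel
  induction fuel with
  | zero => intro t h; omega
  | succ f ih =>
      intro t hlt
      simp only [pvF]
      cases hf : pvTokens.find? (fun s => PySem.Chars.endswith (PySem.Chars.rstrip t) s) with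
      | none =>
          intro s hs
          have := List.find?_eq_none.mp hf s hs
          simpa using this
      | some s =>
          have hs : s ∈ pvTokens := List.mem_of_find?_eq_some hf
          have hp : PySem.Chars.endswith (PySem.Chars.rstrip t) s = true := List.find?_some hf
          have hlen := pv_strip_len (PySem.Chars.rstrip t) s hs hp
          have hr := pv_rstrip_length_le t
          exact ih _ (by omega)

-- invariant of the fold that is A's inner for-loop
lemma pv_pass_inv : ∀ (TS : List (List Char)), (∀ s ∈ TS, s ∈ pvTokens) →
    ∀ (t : List Char) (ch : Bool),
    pvFF (TS.foldl pvStepA (t, ch)).1 = pvFF t ∧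
    (TS.foldl pvStepA (t, ch)).1.length ≤ t.length ∧
    ((TS.foldl pvStepA (t, ch)).2 = false →
      ch = false ∧ (TS.foldl pvStepA (t, ch)).1 = t ∧ ∀ s ∈ TS, PySem.Chars.endswith t s = false) ∧
    (ch = false → (TS.foldl pvStepA (t, ch)).2 = true → (TS.foldl pvStepA (t, ch)).1.length < t.length) := by
  intro TS
  induction TS with
  | nil =>
      intro _ t ch
      refine ⟨rfl, le_rfl, fun h => ⟨h, rfl, by simp⟩, fun h1 h2 => by simp [h1] at h2⟩
  | cons s TS ih =>
      intro hTS t ch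
      have hsmem : s ∈ pvTokens := hTS s (by simp)
      by_cases he : PySem.Chars.endswith t s = true
      · simp only [List.foldl_cons, pvStepA, he, if_pos]
        have hlen := pv_strip_len t s hsmem he
        obtain ⟨ih1, ih2, ih3, _⟩ := ih (fun x hx => hTS x (by simp [hx]))
          (t.take (t.length - s.length)) true
        refine ⟨?_, ?_, ?_, ?_⟩
        · rw [ih1]; exact pvFF_strip_token t s hsmem he
        · omega
        · intro hf; exact absurd (ih3 hf).1 (by simp)
        · intro _ _; omega
      · have he' : PySem.Chars.endswith t s = false := by simpa using he
        simp only [List.foldl_cons, pvStepA, he', Bool.false_eq_true, if_false]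
        obtain ⟨ih1, ih2, ih3, ih4⟩ := ih (fun x hx => hTS x (by simp [hx])) t ch
        refine ⟨ih1, ih2, ?_, ih4⟩
        intro hf
        obtain ⟨h1, h2, h3⟩ := ih3 hf
        refine ⟨h1, h2, ?_⟩
        intro x hx
        rcases List.mem_cons.mp hx with rfl | hx
        · exact he'
        · exact h3 x hx

lemma pv_loopA_eq_pvFF : ∀ fuel : Nat, ∀ t : List Char, t.length < fuel →
    PySem.Chars.rstrip t = t → pvLoopA fuel t = pvFF t := by
  intro fuel
  induction fuel with
  | zero => intro t h _; omega
  | succ f ih =>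
      intro t hlt hrs
      obtain ⟨h1, h2, h3, h4⟩ := pv_pass_inv pvTokens (fun _ h => h) t false
      simp only [pvLoopA, pvPassA]
      cases hp2 : (pvTokens.foldl pvStepA (t, false)).2 with
      | false =>
          obtain ⟨_, hp1, hnm⟩ := h3 hp2
          rw [hp1]
          simp only [Bool.false_eq_true, if_false]
          refine (pvFF_no_token t ?_).symm
          intro s hs
          rw [hrs]
          exact hnm s hs
      | true =>
          have hlt2 := h4 rfl hp2
          simp only [if_true]
          have hrl := pv_rstrip_length_le (pvTokens.foldl pvStepA (t, false)).1
          rw [ih (PySem.Chars.rstrip (pvTokens.foldl pvStepA (t, false)).1) (by omega)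
              (pv_rstrip_idem _)]
          rw [pvFF_rstrip, h1]

lemma pv_pass_nomatch (TS : List (List Char)) (t : List Char)
    (h : ∀ s ∈ TS, PySem.Chars.endswith t s = false) :
    TS.foldl pvStepA (t, false) = (t, false) := by
  induction TS with
  | nil => rfl
  | cons s TS ih =>
      have hs := h s (by simp)
      simp only [List.foldl_cons, pvStepA, hs, Bool.false_eq_true, if_false]
      exact ih (fun s' hs' => h s' (by simp [hs']))

-- when the input ends in whitespace, A's first pass strips nothing and A returns rstrip(text)
lemma pv_loopA_ws (t : List Char) (h : PySem.Chars.isspace (t.getLastD 'x') = true) :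
    pvLoopA (t.length + 1) t = PySem.Chars.rstrip t := by
  have hnm : ∀ s ∈ pvTokens, PySem.Chars.endswith t s = false := by
    intro s hs
    by_contra hc
    have he : PySem.Chars.endswith t s = true := by simpa using hc
    rw [pv_endswith_last t s (pvTok_ne_nil s hs) he, pvTok_last s hs] at h
    exact Bool.false_ne_true h
  have hp := pv_pass_nomatch pvTokens t hnm
  simp [pvLoopA, pvPassA, hp]

lemma pv_skipws_spec (t : List Char) : ∀ e : Nat, e ≤ t.length →
    t.take (pvSkipWs t e) = PySem.Chars.rstrip (t.take e) ∧ pvSkipWs t e ≤ e := by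
  intro e
  induction e with
  | zero => intro _; exact ⟨rfl, le_rfl⟩
  | succ e ih =>
      intro he
      have he' : e < t.length := by omega
      have hgetD : t.getD e ' ' = t[e] := List.getD_eq_getElem t ' ' he'
      have htake : t.take (e+1) = t.take e ++ [t[e]] := List.take_succ_eq_append_getElem he'
      obtain ⟨ih1, ih2⟩ := ih (by omega)
      by_cases hsp : PySem.Chars.isspace t[e] = true
      · simp only [pvSkipWs, hgetD, hsp, if_pos]
        rw [htake, pv_rstrip_concat, if_pos hsp]
        exact ⟨ih1, by omega⟩
      · have hsp' : PySem.Chars.isspace t[e] = false := by simpa using hsp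
        simp only [pvSkipWs, hgetD, hsp', Bool.false_eq_true, if_false]
        rw [htake, pv_rstrip_concat, if_neg (by simp [hsp'])]
        exact ⟨rfl, le_rfl⟩

lemma pv_loopB_eq_pvFF (t : List Char) : ∀ fuel e : Nat, e ≤ t.length → e < fuel →
    t.take (pvLoopB t fuel e) = pvFF (t.take e) ∧ pvLoopB t fuel e ≤ e := by
  intro fuel
  induction fuel with
  | zero => intro e _ h; omega
  | succ F ih =>
      intro e he hf
      obtain ⟨hws, hle⟩ := pv_skipws_spec t e he
      have hlen_r : (t.take (pvSkipWs t e)).length = pvSkipWs t e := by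
        rw [List.length_take]; omega
      have hlen_e : (t.take e).length = e := by rw [List.length_take]; omega
      cases hfind : pvTokens.find? (fun s => PySem.Chars.endswith (t.take (pvSkipWs t e)) s) with
      | none =>
          have hBstep : pvLoopB t (F+1) e = pvSkipWs t e := by
            simp only [pvLoopB, pvFindTok, hfind]
          have hFstep : pvFF (t.take e) = t.take (pvSkipWs t e) := by
            rw [pvFF, hlen_e, pvF]
            simp only [← hws, hfind]
          rw [hBstep, hFstep]
          exact ⟨rfl, hle⟩
      | some s =>
          have hs : s ∈ pvTokens := List.mem_of_find?_eq_some hfind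
          have hp : PySem.Chars.endswith (t.take (pvSkipWs t e)) s = true := List.find?_some hfind
          have hsl := pv_strip_len (t.take (pvSkipWs t e)) s hs hp
          rw [hlen_r] at hsl
          have hmin : min (pvSkipWs t e - s.length) (pvSkipWs t e) = pvSkipWs t e - s.length := by
            omega
          have hBstep : pvLoopB t (F+1) e = pvLoopB t F (pvSkipWs t e - s.length) := by
            simp only [pvLoopB, pvFindTok, hfind]
          have hFstep : pvFF (t.take e) = pvF e (t.take (pvSkipWs t e - s.length)) := by
            rw [pvFF, hlen_e, pvF]
            simp only [← hws, hfind, hlen_r, List.take_take, hmin]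
          have hlen2 : (t.take (pvSkipWs t e - s.length)).length = pvSkipWs t e - s.length := by
            rw [List.length_take]; omega
          have hirr : pvF e (t.take (pvSkipWs t e - s.length)) =
              pvFF (t.take (pvSkipWs t e - s.length)) := by
            rw [pvFF]
            exact pvF_fuel_irrel _ _ _ (by omega) (by omega)
          obtain ⟨ihA, ihB⟩ := ih (pvSkipWs t e - s.length) (by omega) (by omega)
          rw [hBstep, hFstep, hirr]
          exact ⟨ihA, by omega⟩

lemma pv_altB (text : String) :
    strip_trailing_specials_py_alt text = String.ofList (pvFF text.toList) := by
  have h := (pv_loopB_eq_pvFF text.toList (text.toList.length + 1) text.toList.length le_rfl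
    (by omega)).1
  simp only [strip_trailing_specials_py_alt, h, List.take_length]

-- ===== VERDICT (by name: the statement is the Claim_ definition above) =====
theorem strip_trailing_specials_py_spec : Claim_unchanged_strip_trailing_specials_py := by
  intro text _ hnD
  rw [pv_altB]
  unfold strip_trailing_specials_py
  by_cases hrs : PySem.Chars.rstrip text.toList = text.toList
  · rw [pv_loopA_eq_pvFF (text.toList.length + 1) text.toList (by omega) hrs]
  · have hws := pv_rstrip_ne_self text.toList hrs
    rw [pv_loopA_ws text.toList hws]
    have hnm : ∀ s ∈ pvTokens, PySem.Chars.endswith (PySem.Chars.rstrip text.toList) s = false := by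
      intro s hs
      by_contra hc
      exact hnD ⟨hws, s, hs, by simpa using hc⟩
    rw [← pvFF_no_token text.toList hnm]

theorem strip_trailing_specials_py_changed : Claim_changed_strip_trailing_specials_py := by
  unfold Claim_changed_strip_trailing_specials_py; decide

theorem strip_trailing_specials_py_tight : Claim_exact_strip_trailing_specials_py := by
  intro text _ hD heq
  obtain ⟨hws, s, hs, hsuf⟩ := hD
  rw [pv_altB] at heq
  unfold strip_trailing_specials_py at heq
  rw [pv_loopA_ws text.toList hws] at heq
  have hlist : PySem.Chars.rstrip text.toList = pvFF text.toList := String.ofList_inj.mp heq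
  have hno := pvF_no_token_suffix (text.toList.length + 1) text.toList (by omega) s hs
  rw [← pvFF] at hno
  rw [← hlist, hsuf] at hno
  simp at hno
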